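-- pv_equiv track=rewrite | github.com/CSSB-SNU/BioMol | preprocessing/seq_hash_DB.py | find_pdbIDs_by_hashes
-- ===== SOURCE A (Python) =====
-- def find_pdbIDs_by_hashes(
--     hash_list: list[str], hash_to_pdbIDs: dict[str, list[str]]
-- ) -> list[str]:
--     """
--     Given a list of hashes, return a dictionary mapping each hash to its corresponding PDB IDs.
--     """
--     pdb_IDs = {}
--     for seq_hash in hash_list:
--         if seq_hash in hash_to_pdbIDs:
--             pdb_IDs[seq_hash] = hash_to_pdbIDs[seq_hash]
--         else:
--             raise ValueError(f"Hash {seq_hash} not found in the database.")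
--
--     # find common pdbIDs
--     common_pdbIDs = set(pdb_IDs[hash_list[0]])
--     for seq_hash in hash_list[1:]:
--         common_pdbIDs.intersection_update(pdb_IDs[seq_hash])
--
--     if len(common_pdbIDs) == 0:
--         raise ValueError("No common PDB IDs found for the given hashes.")
--     return sorted(list(common_pdbIDs))
-- ===== SOURCE B (Python) =====
-- from collections import Counter
--
--
-- def find_pdbIDs_by_hashes(
--     hash_list: list[str], hash_to_pdbIDs: dict[str, list[str]]
-- ) -> list[str]:
--     for seq_hash in hash_list:
--         if seq_hash not in hash_to_pdbIDs:
--             raise ValueError(f"Hash {seq_hash} not found in the database.")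
--
--     uniq = list(dict.fromkeys(hash_list))
--     counts = Counter()
--     for seq_hash in uniq:
--         counts.update(list(dict.fromkeys(hash_to_pdbIDs[seq_hash])))
--
--     common = [pid for pid, c in counts.items() if c == len(uniq)]
--     if not common:
--         raise ValueError("No common PDB IDs found for the given hashes.")
--     return sorted(common)
-- ===== Notes on version B (the rewrite author's own statement) =====
-- stated objective: idiomatic
-- what changed: Replaces A's incremental set-intersection loop by a collections.Counter pass: count, for each distinct hash, its deduplicated PDB-ID list, then keep the IDs whose count equals the number of distinct hashes; same validation, same exceptions, same sorted result.
import Mathlib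
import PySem

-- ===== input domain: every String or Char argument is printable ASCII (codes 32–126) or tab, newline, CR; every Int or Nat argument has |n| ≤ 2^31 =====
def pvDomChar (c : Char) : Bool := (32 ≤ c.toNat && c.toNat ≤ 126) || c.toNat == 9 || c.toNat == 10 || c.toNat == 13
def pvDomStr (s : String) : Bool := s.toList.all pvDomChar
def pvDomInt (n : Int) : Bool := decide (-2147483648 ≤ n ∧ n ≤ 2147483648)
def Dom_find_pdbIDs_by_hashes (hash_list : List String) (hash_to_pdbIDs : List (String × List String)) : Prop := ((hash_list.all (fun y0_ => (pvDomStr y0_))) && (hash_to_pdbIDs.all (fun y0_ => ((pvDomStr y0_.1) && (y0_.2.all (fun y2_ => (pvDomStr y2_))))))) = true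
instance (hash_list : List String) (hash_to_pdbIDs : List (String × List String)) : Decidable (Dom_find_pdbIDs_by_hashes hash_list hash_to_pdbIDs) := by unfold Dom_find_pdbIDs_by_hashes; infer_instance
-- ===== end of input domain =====

-- B replaces A's incremental set-intersection loop by one Counter pass (count, per distinct hash,
-- the deduplicated PDB IDs, then keep the IDs counted by every hash); same return value, not faster.

-- ===== PORT A =====
-- the first loop of A: build pdb_IDs; 'none' = the ValueError on a missing hash
def pvA_build (db : PySem.Dict String (List String)) :
    List String → PySem.Dict String (List String) → Option (PySem.Dict String (List String))
  | [], acc => some acc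
  | h :: t, acc =>
    match db.get? h with
    | some v => pvA_build db t (acc.insert h v)
    | none => none

-- the second loop of A: common_pdbIDs.intersection_update(pdb_IDs[seq_hash])
-- (pdb_IDs[seq_hash] as getD _ []: every hash of the loop was inserted by pvA_build, so the key is present)
def pvA_inter (pdbIDs : PySem.Dict String (List String)) :
    List String → PySem.Set String → PySem.Set String
  | [], c => c
  | h :: t, c => pvA_inter pdbIDs t (PySem.Set.inter c (pdbIDs.getD h []))

def find_pdbIDs_by_hashes (hash_list : List String) (hash_to_pdbIDs : List (String × List String)) : List String :=
  let db := PySem.Dict.mk hash_to_pdbIDs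
  match pvA_build db hash_list (PySem.Dict.mk []) with
  | none => []   -- ValueError "Hash … not found" (excluded by Pre_)
  | some pdbIDs =>
    match PySem.List.pyGet? hash_list 0 with
    | none => []   -- IndexError on hash_list[0] (excluded by Pre_)
    | some h0 =>
      let common := pvA_inter pdbIDs (PySem.List.slice hash_list (some 1) none)
        (PySem.Set.ofList (pdbIDs.getD h0 []))
      if common.length = 0 then []   -- ValueError "No common PDB IDs" (excluded by Pre_)
      else PySem.List.sorted common (fun x => x)

-- ===== PORT B =====
-- B's validation loop; 'false' = the ValueError on the first missing hash
def pvB_validate (db : PySem.Dict String (List String)) : List String → Bool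
  | [] => true
  | h :: t => if db.contains h then pvB_validate db t else false

def find_pdbIDs_by_hashes_alt (hash_list : List String) (hash_to_pdbIDs : List (String × List String)) : List String :=
  let db := PySem.Dict.mk hash_to_pdbIDs
  if pvB_validate db hash_list then
    let uniq := PySem.List.dedup hash_list
    let counts := uniq.foldl
      (fun c h => (PySem.List.dedup (db.getD h [])).foldl (fun c p => c.modify p 0 (· + 1)) c)
      (PySem.Dict.mk [])
    let common := (counts.items.filter (fun p => p.2 == (uniq.length : Int))).map Prod.fst
    if common = [] then []   -- ValueError "No common PDB IDs" (excluded by Pre_)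
    else PySem.List.sorted common (fun x => x)
  else []   -- ValueError "Hash … not found" (excluded by Pre_)

-- ===== PRECONDITION & SPEC =====
-- Pre_ excludes exactly the inputs on which A raises: an empty hash_list (IndexError on hash_list[0]),
-- a hash absent from hash_to_pdbIDs (ValueError), and an empty intersection (ValueError).
def Pre_find_pdbIDs_by_hashes (hash_list : List String) (hash_to_pdbIDs : List (String × List String)) : Prop :=
  hash_list ≠ [] ∧
  (∀ h ∈ hash_list, ((PySem.Dict.mk hash_to_pdbIDs).get? h).isSome) ∧
  ∃ x ∈ (PySem.Dict.mk hash_to_pdbIDs).getD hash_list.headI [],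
    ∀ h ∈ hash_list, x ∈ (PySem.Dict.mk hash_to_pdbIDs).getD h []
instance (hash_list : List String) (hash_to_pdbIDs : List (String × List String)) : Decidable (Pre_find_pdbIDs_by_hashes hash_list hash_to_pdbIDs) := by unfold Pre_find_pdbIDs_by_hashes; infer_instance

def pvWitness_find_pdbIDs_by_hashes : List String × (List (String × List String)) :=
  (["h1", "h2"], [("h1", ["1abc", "2xyz"]), ("h2", ["2xyz"])])

def Spec_find_pdbIDs_by_hashes (hash_list : List String) (hash_to_pdbIDs : List (String × List String)) (out : List String) : Prop := out = find_pdbIDs_by_hashes_alt hash_list hash_to_pdbIDs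
instance (hash_list : List String) (hash_to_pdbIDs : List (String × List String)) (out : List String) : Decidable (Spec_find_pdbIDs_by_hashes hash_list hash_to_pdbIDs out) := by unfold Spec_find_pdbIDs_by_hashes; infer_instance

-- ===== CLAIM (what is proved, stated in full; the proofs are below) =====
def Claim_equal_find_pdbIDs_by_hashes : Prop := ∀ (hash_list : List String) (hash_to_pdbIDs : List (String × List String)), Dom_find_pdbIDs_by_hashes hash_list hash_to_pdbIDs → Pre_find_pdbIDs_by_hashes hash_list hash_to_pdbIDs → Spec_find_pdbIDs_by_hashes hash_list hash_to_pdbIDs (find_pdbIDs_by_hashes hash_list hash_to_pdbIDs)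

-- ===== LEMMAS AND PROOFS =====

-- A's first loop: when every hash is present it succeeds, and the dict it builds answers
-- every lookup exactly as the database does (on the processed hashes).
theorem pvA_build_spec (db : PySem.Dict String (List String)) (l : List String)
    (acc : PySem.Dict String (List String)) (hall : ∀ h ∈ l, (db.get? h).isSome) :
    ∃ d, pvA_build db l acc = some d ∧
      ∀ x, d.getD x [] = if x ∈ l then db.getD x [] else acc.getD x [] := by
  induction l generalizing acc with
  | nil => exact ⟨acc, rfl, fun x => by simp⟩
  | cons h t ih =>
    obtain ⟨v, hv⟩ := Option.isSome_iff_exists.mp (hall h (by simp))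
    obtain ⟨d, hd, hspec⟩ := ih (acc.insert h v) (fun g hg => hall g (by simp [hg]))
    refine ⟨d, by simp [pvA_build, hv, hd], fun x => ?_⟩
    rw [hspec x]
    by_cases hxt : x ∈ t
    · simp [hxt]
    · by_cases hxh : x = h
      · subst hxh
        simp [hxt, PySem.Dict.getD, hv]
      · simp [hxt, hxh, PySem.Dict.getD_insert_of_ne acc _ _ hxh]

-- A's second loop, as a set: x survives iff it is in the start set and in every lookup.
theorem pvA_inter_mem (p : PySem.Dict String (List String)) (l : List String)
    (c : PySem.Set String) (x : String) :
    x ∈ pvA_inter p l c ↔ x ∈ c ∧ ∀ h ∈ l, x ∈ p.getD h [] := by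
  induction l generalizing c with
  | nil => simp [pvA_inter]
  | cons h t ih =>
    rw [pvA_inter, ih, PySem.Set.mem_inter]
    simp only [List.forall_mem_cons]
    tauto

theorem pvA_inter_nodup (p : PySem.Dict String (List String)) (l : List String)
    (c : PySem.Set String) (hc : c.Nodup) : (pvA_inter p l c).Nodup := by
  induction l generalizing c with
  | nil => exact hc
  | cons h t ih => exact ih _ (PySem.Set.nodup_inter _ _ hc)

-- B's validation loop succeeds when every hash is present.
theorem pvB_validate_true (db : PySem.Dict String (List String)) (l : List String)
    (hall : ∀ h ∈ l, (db.get? h).isSome) : pvB_validate db l = true := by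
  induction l with
  | nil => rfl
  | cons h t ih =>
    rw [pvB_validate, if_pos, ih (fun g hg => hall g (by simp [hg]))]
    rw [PySem.Dict.contains_eq_isSome_get?]
    exact hall h (by simp)

-- B's counter: the count of x is the number of (distinct) hashes whose ID list contains x.
theorem pvB_counts_getD (db : PySem.Dict String (List String)) (l : List String)
    (c : PySem.Dict String Int) (x : String) :
    (l.foldl (fun c h => (PySem.List.dedup (db.getD h [])).foldl
        (fun c p => c.modify p 0 (· + 1)) c) c).getD x 0
      = c.getD x 0 + ((l.countP (fun h => decide (x ∈ db.getD h []))) : Int) := by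
  induction l generalizing c with
  | nil => simp
  | cons h t ih =>
    rw [List.foldl_cons, ih, PySem.Dict.getD_foldl_modify_add_one,
      (PySem.List.nodup_dedup (db.getD h [])).count, List.countP_cons]
    simp only [PySem.List.mem_dedup]
    by_cases hm : x ∈ db.getD h []
    · simp [hm]; ring
    · simp [hm]

theorem pvB_counts_keys (db : PySem.Dict String (List String)) (l : List String)
    (c : PySem.Dict String Int) (x : String) :
    x ∈ (l.foldl (fun c h => (PySem.List.dedup (db.getD h [])).foldl
        (fun c p => c.modify p 0 (· + 1)) c) c).keys
      ↔ x ∈ c.keys ∨ ∃ h ∈ l, x ∈ db.getD h [] := by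
  induction l generalizing c with
  | nil => simp
  | cons h t ih =>
    rw [List.foldl_cons, ih, PySem.Dict.keys_foldl_modify, PySem.Set.mem_update]
    simp only [PySem.List.mem_dedup, List.exists_mem_cons_iff]
    tauto

theorem pvB_counts_keys_nodup (db : PySem.Dict String (List String)) (l : List String)
    (c : PySem.Dict String Int) (hc : c.keys.Nodup) :
    (l.foldl (fun c h => (PySem.List.dedup (db.getD h [])).foldl
        (fun c p => c.modify p 0 (· + 1)) c) c).keys.Nodup := by
  induction l generalizing c with
  | nil => exact hc
  | cons h t ih =>
    refine ih _ ?_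
    rw [PySem.Dict.keys_foldl_modify]
    exact PySem.Set.nodup_update _ _ hc

-- ===== VERDICT (by name: the statement is the Claim_ definition above) =====
theorem find_pdbIDs_by_hashes_spec : Claim_equal_find_pdbIDs_by_hashes := by
  intro hl db0 _ hpre
  obtain ⟨hne, hall, x0, hx0mem, hx0all⟩ := hpre
  obtain ⟨a, t, rfl⟩ : ∃ a t, hl = a :: t := by
    cases hl with
    | nil => exact absurd rfl hne
    | cons a t => exact ⟨a, t, rfl⟩
  obtain ⟨d, hd, hdspec⟩ := pvA_build_spec (PySem.Dict.mk db0) (a :: t) (PySem.Dict.mk []) hall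
  have hda : ∀ h ∈ a :: t, d.getD h [] = (PySem.Dict.mk db0).getD h [] := by
    intro h hh; rw [hdspec h, if_pos hh]
  have hget : PySem.List.pyGet? (a :: t) (0 : Int) = some a := by simp [pysem]
  have hval : pvB_validate (PySem.Dict.mk db0) (a :: t) = true := pvB_validate_true _ _ hall
  -- the two candidate lists
  set commonA := pvA_inter d t (PySem.Set.ofList (d.getD a [])) with hcA
  set uniq := PySem.List.dedup (a :: t) with hu
  set counts := uniq.foldl
      (fun c h => (PySem.List.dedup ((PySem.Dict.mk db0).getD h [])).foldl
        (fun c p => c.modify p 0 (· + 1)) c)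
      (PySem.Dict.mk [] : PySem.Dict String Int) with hcounts
  set commonB := (counts.items.filter (fun p => p.2 == (uniq.length : Int))).map Prod.fst with hcB
  -- membership characterisation of A's set
  have memA : ∀ x, x ∈ commonA ↔ ∀ h ∈ a :: t, x ∈ (PySem.Dict.mk db0).getD h [] := by
    intro x
    rw [hcA, pvA_inter_mem, PySem.Set.mem_ofList, hda a (by simp)]
    simp only [List.forall_mem_cons]
    constructor
    · rintro ⟨h1, h2⟩
      exact ⟨h1, fun h hh => by rw [← hda h (by simp [hh])]; exact h2 h hh⟩
    · rintro ⟨h1, h2⟩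
      exact ⟨h1, fun h hh => by rw [hda h (by simp [hh])]; exact h2 h hh⟩
  have nodupA : commonA.Nodup := pvA_inter_nodup _ _ _ (PySem.Set.nodup_ofList _)
  -- membership characterisation of B's list
  have keysnodup : counts.keys.Nodup := pvB_counts_keys_nodup _ _ _ (by simp)
  have hitems := PySem.Dict.items_eq_map_keys counts keysnodup 0
  have memB' : ∀ x, x ∈ commonB ↔ x ∈ counts.keys ∧ counts.getD x 0 = (uniq.length : Int) := by
    intro x
    rw [hcB]
    constructor
    · intro hx
      obtain ⟨p, hp, rfl⟩ := List.mem_map.mp hx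
      obtain ⟨hpi, h2⟩ := List.mem_filter.mp hp
      rw [hitems] at hpi
      obtain ⟨k, hk, rfl⟩ := List.mem_map.mp hpi
      exact ⟨hk, beq_iff_eq.mp h2⟩
    · rintro ⟨hk, h2⟩
      refine List.mem_map.mpr ⟨(x, counts.getD x 0),
        List.mem_filter.mpr ⟨?_, beq_iff_eq.mpr h2⟩, rfl⟩
      rw [hitems]
      exact List.mem_map.mpr ⟨x, hk, rfl⟩
  have hcount : ∀ x, counts.getD x 0
      = ((uniq.countP (fun h => decide (x ∈ (PySem.Dict.mk db0).getD h []))) : Int) := by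
    intro x
    rw [hcounts, pvB_counts_getD]
    show (0 : Int) + _ = _
    rw [zero_add]
  have memB : ∀ x, x ∈ commonB ↔ ∀ h ∈ a :: t, x ∈ (PySem.Dict.mk db0).getD h [] := by
    intro x
    rw [memB' x]
    constructor
    · rintro ⟨-, hlen⟩ h hh
      rw [hcount] at hlen
      have hcp : uniq.countP (fun h => decide (x ∈ (PySem.Dict.mk db0).getD h []))
          = uniq.length := by exact_mod_cast hlen
      have := List.countP_eq_length.mp hcp h ((PySem.List.mem_dedup _ h).mpr hh)
      simpa using this
    · intro hallh
      have hcp : uniq.countP (fun h => decide (x ∈ (PySem.Dict.mk db0).getD h []))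
          = uniq.length :=
        List.countP_eq_length.mpr (fun h hh => by
          simpa using hallh h ((PySem.List.mem_dedup _ h).mp hh))
      refine ⟨?_, by rw [hcount]; exact_mod_cast hcp⟩
      rw [hcounts, pvB_counts_keys]
      exact Or.inr ⟨a, (PySem.List.mem_dedup _ a).mpr (by simp), hallh a (by simp)⟩
  have nodupB : commonB.Nodup := by
    have h1 : commonB.Sublist counts.keys := by
      have h2 := (List.filter_sublist (p := fun p : String × Int => p.2 == (uniq.length : Int)) (l := counts.items)).map Prod.fst
      simpa [PySem.Dict.keys, hcB] using h2
    exact keysnodup.sublist h1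
  -- both lists are nonempty and contain the same elements
  have hxA : x0 ∈ commonA := (memA x0).mpr hx0all
  have hxB : x0 ∈ commonB := (memB x0).mpr hx0all
  have hperm : commonA.Perm commonB :=
    (List.perm_ext_iff_of_nodup nodupA nodupB).mpr (fun x => (memA x).trans (memB x).symm)
  -- assemble
  unfold Spec_find_pdbIDs_by_hashes find_pdbIDs_by_hashes find_pdbIDs_by_hashes_alt
  simp only [hd, hget, hval, PySem.List.slice_from_one, List.tail_cons, if_true]
  rw [← hcA, ← hu, ← hcounts, ← hcB]
  rw [if_neg (by simpa using List.ne_nil_of_mem hxA), if_neg (List.ne_nil_of_mem hxB)]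
  exact PySem.List.sorted_eq_sorted_of_perm _ _ _ (fun _ _ h => h) hperm
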